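-- pv_equiv track=rewrite | github.com/doug-wade/AlgorithmsGreatestHits | kosarajus.py | topological_sort_two
-- ===== SOURCE A (Python) =====
-- from collections import deque
--
-- def depth_first_search(graph, start, path, explored):
--     """
--     Performs depth-first search to find a sink node.  At the sink node, it
--     appends the sink node to a queue, which tracks the topological sorting
--     of the graph.
--     """
--     explored |= {start}
--     if start in graph.keys():
--         for x in graph[start]:
--             if x not in explored:
--                 depth_first_search(graph, x, path, explored)
--     path.appendleft(start)
--
-- def topological_sort_two(graph, sort_order):
--     """
--     Performs a topological sort on a directed graph, while tracking boundaries
--     between strongly sorted components.  Returns a list of sets, each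
--     representing a strongly connected components.
--     """
--     path, boundaries, explored = deque(), deque(), set()
--     for key in sort_order:
--         if key not in explored:
--             boundaries.appendleft(key)
--             depth_first_search(graph, key, path, explored)
--     b = boundaries.pop()
--     scc = set()
--     sccs = []
--     while len(path):
--         elem = path.pop()
--         scc |= {elem}
--         if elem == b:
--             if len(boundaries):
--                 b = boundaries.pop()
--             else:
--                 scc |= set(path)
--                 sccs.append(scc)
--                 return sccs
--             sccs.append(scc.copy())
--             scc.clear()
-- ===== SOURCE B (Python) =====
-- def topological_sort_two(graph, sort_order):
--     """
--     Same result as A, computed without the path/boundaries deques: run an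
--     explicit-stack iterative DFS from each unexplored key, collecting that
--     tree's nodes in post-order; each collected tree is one component set.
--     """
--     explored = set()
--     sccs = []
--     for key in sort_order:
--         if key in explored:
--             continue
--         explored.add(key)
--         comp = []
--         stack = [[key, list(graph.get(key, []))]]
--         while stack:
--             node, rest = stack[-1]
--             if rest:
--                 child = rest.pop(0)
--                 if child not in explored:
--                     explored.add(child)
--                     stack.append([child, list(graph.get(child, []))])
--             else:
--                 stack.pop()
--                 comp.append(node)
--         sccs.append(set(comp))
--     return sccs
-- ===== Notes on version B (the rewrite author's own statement) =====
-- stated objective: simpler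
-- what changed: Replaces A's recursive DFS plus path/boundaries deques and the boundary-matching extraction scan by an explicit-stack iterative DFS that collects each DFS tree's nodes directly as one component, so the whole deque bookkeeping and the while-loop scan disappear.
import Mathlib
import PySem

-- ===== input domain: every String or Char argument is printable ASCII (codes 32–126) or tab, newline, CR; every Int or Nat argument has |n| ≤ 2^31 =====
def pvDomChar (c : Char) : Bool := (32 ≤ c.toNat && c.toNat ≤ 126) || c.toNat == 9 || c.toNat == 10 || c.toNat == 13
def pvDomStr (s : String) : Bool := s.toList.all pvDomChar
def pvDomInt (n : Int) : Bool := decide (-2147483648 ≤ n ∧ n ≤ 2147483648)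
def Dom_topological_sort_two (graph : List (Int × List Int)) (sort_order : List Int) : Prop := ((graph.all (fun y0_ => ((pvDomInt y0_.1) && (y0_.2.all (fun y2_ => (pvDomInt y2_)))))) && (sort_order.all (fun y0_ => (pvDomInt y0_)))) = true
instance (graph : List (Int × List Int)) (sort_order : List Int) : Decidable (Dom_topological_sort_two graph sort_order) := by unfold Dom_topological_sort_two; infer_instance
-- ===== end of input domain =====

-- B replaces A's recursive DFS + path/boundaries deques + SCC-extraction scan by an
-- explicit-stack iterative DFS that collects each DFS tree directly (objective: simpler
-- decomposition, same cost). Equality is about the return value; A mutates none of its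
-- arguments observably. A raises IndexError on empty sort_order (excluded by Pre_);
-- B's loop simply returns [] there.

-- ===== PORT A =====
-- A's recursive depth_first_search, with a fuel guard making the recursion total.
-- `path.appendleft x` is `x :: path`; the sets use PySem.Set. The fuel used by the
-- entry point (pvFuel) provably suffices (lemma dfsA_suff below), so the `none`
-- (fuel-exhausted) results are unreachable from the entry point.
mutual
def dfsA (graph : List (Int × List Int)) (fuel : Nat) (start : Int) (path : List Int) (explored : PySem.Set Int) : Option (List Int × PySem.Set Int) :=
  match fuel with
  | 0 => none
  | f + 1 =>
    let explored' := PySem.Set.add explored start   -- explored |= {start}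
    match (PySem.Dict.mk graph).get? start with     -- if start in graph.keys(): graph[start]
    | some ns =>
      match dfsL graph f ns path explored' with
      | none => none
      | some (p, e) => some (start :: p, e)         -- path.appendleft(start)
    | none => some (start :: path, explored')
termination_by (fuel, 0)

-- the `for x in graph[start]` loop of depth_first_search
def dfsL (graph : List (Int × List Int)) (fuel : Nat) (xs : List Int) (path : List Int) (explored : PySem.Set Int) : Option (List Int × PySem.Set Int) :=
  match xs with
  | [] => some (path, explored)
  | x :: rest =>
    if PySem.Set.contains explored x then dfsL graph fuel rest path explored
    else
      match dfsA graph fuel x path explored with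
      | none => none
      | some (p, e) => dfsL graph fuel rest p e
termination_by (fuel, xs.length + 1)
end

def pvFuel (graph : List (Int × List Int)) (sort_order : List Int) : Nat :=
  (sort_order ++ graph.flatMap (fun p => p.2)).length + 1

-- the `for key in sort_order` loop of topological_sort_two
def loopA (graph : List (Int × List Int)) (fuel : Nat) (keys : List Int) (path : List Int) (boundaries : List Int) (explored : PySem.Set Int) : List Int × List Int × PySem.Set Int :=
  match keys with
  | [] => (path, boundaries, explored)
  | key :: keys =>
    if PySem.Set.contains explored key then loopA graph fuel keys path boundaries explored
    else
      match dfsA graph fuel key path explored with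
      | none => loopA graph fuel keys path (key :: boundaries) explored  -- unreachable: pvFuel suffices (dfsA_suff)
      | some (p, e) => loopA graph fuel keys p (key :: boundaries) e     -- boundaries.appendleft(key)

-- the `while len(path)` loop.  Both deques are popped from the RIGHT, so the loop is
-- rendered as head-first recursion over the REVERSED deques (same pops, same order).
def scanA (rpath : List Int) (b : Int) (rbound : List Int) (scc : PySem.Set Int) (sccs : List (List Int)) : List (List Int) :=
  match rpath with
  | [] => sccs  -- Python falls off the while loop (returns None); unreachable under Pre_
  | elem :: rest =>
    let scc' := PySem.Set.add scc elem            -- scc |= {elem}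
    if elem = b then
      match rbound with
      | b' :: rbs => scanA rest b' rbs PySem.Set.empty (sccs ++ [scc'])  -- append scc.copy(); scc.clear()
      | [] => sccs ++ [rest.foldl PySem.Set.add scc']                    -- scc |= set(path); append; return
    else scanA rest b rbound scc' sccs

def topological_sort_two (graph : List (Int × List Int)) (sort_order : List Int) : List (List Int) :=
  let res := loopA graph (pvFuel graph sort_order) sort_order [] [] PySem.Set.empty
  match res.2.1.reverse with
  | [] => []  -- boundaries.pop() raises IndexError here (empty sort_order); excluded by Pre_
  | b :: rbs => scanA res.1.reverse b rbs PySem.Set.empty []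

-- ===== PORT B =====
-- graph.get(node, [])
def gLook (graph : List (Int × List Int)) (n : Int) : List Int :=
  ((PySem.Dict.mk graph).get? n).getD []

-- termination helpers for stepB (cited by its decreasing_by): the measure counts the
-- still-unexplored nodes (weighted), the pending child lists and the stack height.
def pvNbrs (graph : List (Int × List Int)) : List Int := graph.flatMap (fun p => p.2)

def pvMeas (graph : List (Int × List Int)) (stack : List (Int × List Int)) (explored : PySem.Set Int) : Nat :=
  (((pvNbrs graph ++ stack.flatMap (fun p => p.2)).toFinset.filter (fun x => PySem.Set.contains explored x = false)).card) * (2 * (pvNbrs graph).length + 4)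
  + 2 * (stack.map (fun f => f.2.length)).sum + stack.length

theorem gLook_mem (graph : List (Int × List Int)) (n y : Int) (h : y ∈ gLook graph n) : y ∈ pvNbrs graph := by
  induction graph with
  | nil => simp [gLook, PySem.Dict.get?] at h
  | cons p g ih =>
    obtain ⟨k, v⟩ := p
    rw [gLook, PySem.Dict.get?_mk_cons] at h
    by_cases hk : k == n
    · simp [hk] at h; simp [pvNbrs]; tauto
    · simp [hk] at h
      simp [pvNbrs]
      exact Or.inr (by simpa [pvNbrs] using ih (by simpa [gLook] using h))

theorem gLook_len (graph : List (Int × List Int)) (n : Int) : (gLook graph n).length ≤ (pvNbrs graph).length := by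
  induction graph with
  | nil => simp [gLook, PySem.Dict.get?]
  | cons p g ih =>
    obtain ⟨k, v⟩ := p
    rw [gLook, PySem.Dict.get?_mk_cons]
    by_cases hk : k == n
    · simp [hk, pvNbrs]
    · simp only [hk, if_neg]
      simp only [pvNbrs, List.flatMap_cons, List.length_append]
      have := ih
      simp [gLook, pvNbrs] at this ⊢
      omega

theorem pvMeas_advance (graph : List (Int × List Int)) (node child : Int) (rest' : List Int) (st : List (Int × List Int)) (ex : PySem.Set Int) :
    pvMeas graph ((node, rest') :: st) ex < pvMeas graph ((node, child :: rest') :: st) ex := by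
  unfold pvMeas
  have hsub : ((pvNbrs graph ++ ((node, rest') :: st).flatMap (fun p => p.2)).toFinset.filter (fun x => PySem.Set.contains ex x = false)) ⊆ ((pvNbrs graph ++ ((node, child :: rest') :: st).flatMap (fun p => p.2)).toFinset.filter (fun x => PySem.Set.contains ex x = false)) := by
    apply Finset.filter_subset_filter
    intro a ha
    simp only [List.mem_toFinset, List.mem_append, List.flatMap_cons, List.mem_cons] at ha ⊢
    tauto
  have hc := Finset.card_le_card hsub
  have := Nat.mul_le_mul_right (2 * (pvNbrs graph).length + 4) hc
  simp only [List.map_cons, List.sum_cons, List.length_cons]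
  omega

theorem pvMeas_pop (graph : List (Int × List Int)) (node : Int) (st : List (Int × List Int)) (ex : PySem.Set Int) :
    pvMeas graph st ex < pvMeas graph ((node, ([] : List Int)) :: st) ex := by
  unfold pvMeas
  simp only [List.flatMap_cons, List.nil_append, List.map_cons, List.sum_cons, List.length_cons]
  omega

theorem pvMeas_push (graph : List (Int × List Int)) (node child : Int) (rest' : List Int) (st : List (Int × List Int)) (ex : PySem.Set Int)
    (h : PySem.Set.contains ex child = false) :
    pvMeas graph ((child, gLook graph child) :: (node, rest') :: st) (PySem.Set.add ex child) < pvMeas graph ((node, child :: rest') :: st) ex := by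
  unfold pvMeas
  have hchild : child ∉ ex := by
    intro hc
    rw [(PySem.Set.contains_iff ex child).mpr hc] at h
    exact Bool.true_eq_false.mp h
  have hssub : ((pvNbrs graph ++ ((child, gLook graph child) :: (node, rest') :: st).flatMap (fun p => p.2)).toFinset.filter (fun x => PySem.Set.contains (PySem.Set.add ex child) x = false)) ⊂ ((pvNbrs graph ++ ((node, child :: rest') :: st).flatMap (fun p => p.2)).toFinset.filter (fun x => PySem.Set.contains ex x = false)) := by
    constructor
    · intro a ha
      simp only [Finset.mem_filter, List.mem_toFinset, List.mem_append, List.flatMap_cons, List.mem_cons] at ha ⊢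
      obtain ⟨hmem, hcon⟩ := ha
      have hnotmem : a ∉ PySem.Set.add ex child := by
        intro hm
        rw [(PySem.Set.contains_iff _ a).mpr hm] at hcon
        exact Bool.true_eq_false.mp hcon
      rw [PySem.Set.mem_add ex child a] at hnotmem
      push_neg at hnotmem
      constructor
      · have hgm := fun (hx : a ∈ gLook graph child) => gLook_mem graph child a hx
        tauto
      · rcases Bool.eq_false_or_eq_true (PySem.Set.contains ex a) with ht | hf
        · exact absurd ((PySem.Set.contains_iff ex a).mp ht) hnotmem.1
        · exact hf
    · intro hsup
      have hin : child ∈ ((pvNbrs graph ++ ((node, child :: rest') :: st).flatMap (fun p => p.2)).toFinset.filter (fun x => PySem.Set.contains ex x = false)) := by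
        simp only [Finset.mem_filter, List.mem_toFinset, List.mem_append, List.flatMap_cons, List.mem_cons]
        exact ⟨Or.inr (Or.inl (Or.inl trivial)), h⟩
      have := hsup hin
      simp only [Finset.mem_filter] at this
      have hcm : child ∈ PySem.Set.add ex child := (PySem.Set.mem_add ex child child).mpr (Or.inr rfl)
      rw [(PySem.Set.contains_iff _ child).mpr hcm] at this
      exact Bool.true_eq_false.mp this.2
  have hc := Finset.card_lt_card hssub
  have hg := gLook_len graph child
  set A := ((pvNbrs graph ++ ((child, gLook graph child) :: (node, rest') :: st).flatMap (fun p => p.2)).toFinset.filter (fun x => PySem.Set.contains (PySem.Set.add ex child) x = false)).card with hA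
  set B := ((pvNbrs graph ++ ((node, child :: rest') :: st).flatMap (fun p => p.2)).toFinset.filter (fun x => PySem.Set.contains ex x = false)).card with hB
  have hmul : (A + 1) * (2 * (pvNbrs graph).length + 4) ≤ B * (2 * (pvNbrs graph).length + 4) :=
    Nat.mul_le_mul_right _ hc
  have hexp : (A + 1) * (2 * (pvNbrs graph).length + 4) = A * (2 * (pvNbrs graph).length + 4) + (2 * (pvNbrs graph).length + 4) := by ring
  simp only [List.map_cons, List.sum_cons, List.length_cons]
  omega
-- the `while stack` loop of B: an explicit-stack DFS; the Python list's END is the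
-- Lean list's HEAD (stack[-1] = head), `rest.pop(0)` splits the child list.
def stepB (graph : List (Int × List Int)) (stack : List (Int × List Int)) (explored : PySem.Set Int) (comp : List Int) : List Int × PySem.Set Int :=
  match stack with
  | [] => (comp, explored)
  | (node, rest) :: st =>
    match rest with
    | child :: rest' =>
      if PySem.Set.contains explored child then
        stepB graph ((node, rest') :: st) explored comp
      else
        stepB graph ((child, gLook graph child) :: (node, rest') :: st) (PySem.Set.add explored child) comp
    | [] => stepB graph st explored (comp ++ [node])
termination_by pvMeas graph stack explored
decreasing_by
  · exact pvMeas_advance graph node child rest' st explored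
  · rename_i h; exact pvMeas_push graph node child rest' st explored (by simpa using h)
  · exact pvMeas_pop graph node st explored

-- the `for key in sort_order` loop of B; `sccs.append(set(comp))`: comp holds the
-- distinct nodes of the tree in insertion order, which IS its PySem.Set representation.
def loopB (graph : List (Int × List Int)) (keys : List Int) (sccs : List (List Int)) (explored : PySem.Set Int) : List (List Int) × PySem.Set Int :=
  match keys with
  | [] => (sccs, explored)
  | key :: keys =>
    if PySem.Set.contains explored key then loopB graph keys sccs explored
    else
      let r := stepB graph [(key, gLook graph key)] (PySem.Set.add explored key) []
      loopB graph keys (sccs ++ [r.1]) r.2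

def topological_sort_two_alt (graph : List (Int × List Int)) (sort_order : List Int) : List (List Int) :=
  (loopB graph sort_order [] PySem.Set.empty).1

-- ===== PRECONDITION & SPEC =====
-- Pre_ excludes exactly the empty sort_order, on which A's boundaries.pop() raises IndexError.
def Pre_topological_sort_two (graph : List (Int × List Int)) (sort_order : List Int) : Prop :=
  sort_order ≠ []
instance (graph : List (Int × List Int)) (sort_order : List Int) : Decidable (Pre_topological_sort_two graph sort_order) := by unfold Pre_topological_sort_two; infer_instance

def pvWitness_topological_sort_two : (List (Int × List Int)) × List Int :=
  ([(0, [1]), (1, [2, 0]), (2, [0]), (3, [])], [3, 0, 2])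

def Spec_topological_sort_two (graph : List (Int × List Int)) (sort_order : List Int) (out : List (List Int)) : Prop := out = topological_sort_two_alt graph sort_order
instance (graph : List (Int × List Int)) (sort_order : List Int) (out : List (List Int)) : Decidable (Spec_topological_sort_two graph sort_order out) := by unfold Spec_topological_sort_two; infer_instance

-- ===== CLAIM (what is proved, stated in full; the proofs are below) =====
def Claim_equal_topological_sort_two : Prop := ∀ (graph : List (Int × List Int)) (sort_order : List Int), Dom_topological_sort_two graph sort_order → Pre_topological_sort_two graph sort_order → Spec_topological_sort_two graph sort_order (topological_sort_two graph sort_order)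

-- ===== LEMMAS AND PROOFS =====

-- number of nodes of U not yet explored
def Mcount (U : List Int) (ex : PySem.Set Int) : Nat :=
  (U.toFinset.filter (fun x => PySem.Set.contains ex x = false)).card

theorem Mcount_mono (U : List Int) (ex e : PySem.Set Int) (h : ∀ x, x ∈ ex → x ∈ e) :
    Mcount U e ≤ Mcount U ex := by
  apply Finset.card_le_card
  intro a ha
  simp only [Finset.mem_filter] at ha ⊢
  refine ⟨ha.1, ?_⟩
  rcases Bool.eq_false_or_eq_true (PySem.Set.contains ex a) with ht | hf
  · have hae := h a ((PySem.Set.contains_iff ex a).mp ht)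
    rw [(PySem.Set.contains_iff e a).mpr hae] at ha
    exact absurd ha.2 (by simp)
  · exact hf

theorem Mcount_add_lt (U : List Int) (ex : PySem.Set Int) (x : Int) (hU : x ∈ U) (hx : x ∉ ex) :
    Mcount U (PySem.Set.add ex x) < Mcount U ex := by
  apply Finset.card_lt_card
  constructor
  · intro a ha
    simp only [Finset.mem_filter] at ha ⊢
    refine ⟨ha.1, ?_⟩
    rcases Bool.eq_false_or_eq_true (PySem.Set.contains ex a) with ht | hf
    · have hae : a ∈ PySem.Set.add ex x :=
        (PySem.Set.mem_add ex x a).mpr (Or.inl ((PySem.Set.contains_iff ex a).mp ht))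
      rw [(PySem.Set.contains_iff _ a).mpr hae] at ha
      exact absurd ha.2 (by simp)
    · exact hf
  · intro hsup
    have hin : x ∈ U.toFinset.filter (fun y => PySem.Set.contains ex y = false) := by
      simp only [Finset.mem_filter, List.mem_toFinset]
      refine ⟨hU, ?_⟩
      rcases Bool.eq_false_or_eq_true (PySem.Set.contains ex x) with ht | hf
      · exact absurd ((PySem.Set.contains_iff ex x).mp ht) hx
      · exact hf
    have := hsup hin
    simp only [Finset.mem_filter] at this
    have hm : x ∈ PySem.Set.add ex x := (PySem.Set.mem_add ex x x).mpr (Or.inr rfl)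
    rw [(PySem.Set.contains_iff _ x).mpr hm] at this
    exact absurd this.2 (by simp)

theorem Mcount_le_len (U : List Int) (ex : PySem.Set Int) : Mcount U ex ≤ U.length :=
  le_trans (Finset.card_filter_le _ _) (List.toFinset_card_le U)

theorem not_mem_of_contains_false (ex : PySem.Set Int) (x : Int)
    (h : PySem.Set.contains ex x = false) : x ∉ ex := by
  intro hm
  rw [(PySem.Set.contains_iff ex x).mpr hm] at h
  exact absurd h (by simp)

theorem dfsL_suff (fuel : Nat) (U : List Int) (graph : List (Int × List Int))
    (hcl : ∀ n y, y ∈ gLook graph n → y ∈ U) :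
    ∀ xs path ex, (∀ x ∈ xs, x ∈ U) → Mcount U ex < fuel →
    ∃ p e q, dfsL graph fuel xs path ex = some (p, e) ∧ p = q ++ path ∧ q.Nodup ∧
      (∀ x, x ∈ e ↔ x ∈ ex ∨ x ∈ q) ∧ (∀ x ∈ q, x ∉ ex) := by
  induction fuel using Nat.strong_induction_on with
  | _ fuel ih =>
  intro xs
  induction xs with
  | nil =>
    intro path ex _ _
    exact ⟨path, ex, [], by simp [dfsL], by simp, by simp, by simp, by simp⟩
  | cons x rest ihx =>
    intro path ex hxs hf
    rcases Bool.eq_false_or_eq_true (PySem.Set.contains ex x) with hcx | hcx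
    · -- explored: skip
      obtain ⟨p, e, q, h1, h2, h3, h4, h5⟩ := ihx path ex (fun y hy => hxs y (List.mem_cons_of_mem _ hy)) hf
      exact ⟨p, e, q, by rw [dfsL, if_pos hcx]; exact h1, h2, h3, h4, h5⟩
    · -- unexplored: dfsA then continue
      have hxne : x ∉ ex := not_mem_of_contains_false ex x hcx
      have hxU : x ∈ U := hxs x List.mem_cons_self
      have hlt := Mcount_add_lt U ex x hxU hxne
      cases fuel with
      | zero => omega
      | succ f =>
      have hmex : ∀ y, y ∈ ex → y ∈ PySem.Set.add ex x :=
        fun y hy => (PySem.Set.mem_add ex x y).mpr (Or.inl hy)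
      have hmemx : x ∈ PySem.Set.add ex x := (PySem.Set.mem_add ex x x).mpr (Or.inr rfl)
      have hfadd : Mcount U (PySem.Set.add ex x) < f := by omega
      -- unfold dfsA at f+1
      cases hk : (PySem.Dict.mk graph).get? x with
      | some ns =>
        have hns : ∀ y ∈ ns, y ∈ U := by
          intro y hy
          exact hcl x y (by simp [gLook, hk]; exact hy)
        obtain ⟨pL, eL, qL, hL1, hL2, hL3, hL4, hL5⟩ := ih f (by omega) ns path (PySem.Set.add ex x) hns hfadd
        have hA : dfsA graph (f+1) x path ex = some (x :: pL, eL) := by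
          rw [dfsA]; simp only [hk, hL1]
        have hMeL : Mcount U eL ≤ Mcount U ex := by
          have : ∀ y, y ∈ ex → y ∈ eL := fun y hy => (hL4 y).mpr (Or.inl (hmex y hy))
          exact Mcount_mono U ex eL this
        obtain ⟨p, e, q2, h1, h2, h3, h4, h5⟩ := ihx (x :: pL) eL (fun y hy => hxs y (List.mem_cons_of_mem _ hy)) (by omega)
        refine ⟨p, e, q2 ++ x :: qL, ?_, ?_, ?_, ?_, ?_⟩
        · rw [dfsL, if_neg (by rw [hcx]; exact Bool.false_ne_true), hA]
          exact h1
        · rw [h2, hL2]; simp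
        · -- Nodup
          have hxqL : x ∉ qL := fun hx => hL5 x hx hmemx
          have hsub : ∀ y, y ∈ x :: qL → y ∈ eL := by
            intro y hy
            rcases List.mem_cons.mp hy with rfl | hy'
            · exact (hL4 y).mpr (Or.inl hmemx)
            · exact (hL4 y).mpr (Or.inr hy')
          refine List.Nodup.append h3 (List.nodup_cons.mpr ⟨hxqL, hL3⟩) ?_
          intro a ha hb
          exact h5 a ha (hsub a hb)
        · intro y
          have := h4 y
          have h2' := hL4 y
          have h3' := PySem.Set.mem_add ex x y
          simp only [List.mem_append, List.mem_cons] at *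
          tauto
        · intro y hy
          rcases List.mem_append.mp hy with hy1 | hy2
          · intro hyex
            exact h5 y hy1 ((hL4 y).mpr (Or.inl (hmex y hyex)))
          · rcases List.mem_cons.mp hy2 with rfl | hy3
            · exact hxne
            · intro hyex
              exact hL5 y hy3 (hmex y hyex)
      | none =>
        have hA : dfsA graph (f+1) x path ex = some (x :: path, PySem.Set.add ex x) := by
          rw [dfsA]; simp only [hk]
        obtain ⟨p, e, q2, h1, h2, h3, h4, h5⟩ := ihx (x :: path) (PySem.Set.add ex x) (fun y hy => hxs y (List.mem_cons_of_mem _ hy)) (by omega)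
        refine ⟨p, e, q2 ++ [x], ?_, ?_, ?_, ?_, ?_⟩
        · rw [dfsL, if_neg (by rw [hcx]; exact Bool.false_ne_true), hA]
          exact h1
        · rw [h2]; simp
        · refine List.Nodup.append h3 (List.nodup_singleton x) ?_
          intro a ha hb
          rw [List.mem_singleton] at hb
          subst hb
          exact h5 a ha hmemx
        · intro y
          have := h4 y
          have h3' := PySem.Set.mem_add ex x y
          simp only [List.mem_append, List.mem_singleton] at *
          tauto
        · intro y hy
          rcases List.mem_append.mp hy with hy1 | hy2
          · intro hyex
            exact h5 y hy1 (hmex y hyex)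
          · rw [List.mem_singleton] at hy2
            subst hy2
            exact hxne

theorem dfsA_suff (fuel : Nat) (U : List Int) (graph : List (Int × List Int))
    (hcl : ∀ n y, y ∈ gLook graph n → y ∈ U)
    (start : Int) (path : List Int) (ex : PySem.Set Int)
    (hs : start ∈ U) (hx : start ∉ ex) (hf : Mcount U ex < fuel) :
    ∃ p e q, dfsA graph fuel start path ex = some (p, e) ∧ p = q ++ path ∧ q.Nodup ∧
      (∀ x, x ∈ e ↔ x ∈ ex ∨ x ∈ q) ∧ (∀ x ∈ q, x ∉ ex) ∧ (∃ t, q = start :: t) := by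
  have hlt := Mcount_add_lt U ex start hs hx
  cases fuel with
  | zero => omega
  | succ f =>
  have hmex : ∀ y, y ∈ ex → y ∈ PySem.Set.add ex start :=
    fun y hy => (PySem.Set.mem_add ex start y).mpr (Or.inl hy)
  have hmems : start ∈ PySem.Set.add ex start := (PySem.Set.mem_add ex start start).mpr (Or.inr rfl)
  cases hk : (PySem.Dict.mk graph).get? start with
  | some ns =>
    have hns : ∀ y ∈ ns, y ∈ U := by
      intro y hy
      exact hcl start y (by simp [gLook, hk]; exact hy)
    obtain ⟨pL, eL, qL, hL1, hL2, hL3, hL4, hL5⟩ :=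
      dfsL_suff f U graph hcl ns path (PySem.Set.add ex start) hns (by omega)
    refine ⟨start :: pL, eL, start :: qL, ?_, ?_, ?_, ?_, ?_, ⟨qL, rfl⟩⟩
    · rw [dfsA]; simp only [hk, hL1]
    · rw [hL2]; simp
    · refine List.nodup_cons.mpr ⟨fun hsq => hL5 start hsq hmems, hL3⟩
    · intro y
      have := hL4 y
      have h3' := PySem.Set.mem_add ex start y
      simp only [List.mem_cons] at *
      tauto
    · intro y hy
      rcases List.mem_cons.mp hy with rfl | hy'
      · exact hx
      · intro hyex
        exact hL5 y hy' (hmex y hyex)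
  | none =>
    refine ⟨start :: path, PySem.Set.add ex start, [start], ?_, by simp, List.nodup_singleton start, ?_, ?_, ⟨[], rfl⟩⟩
    · rw [dfsA]; simp only [hk]
    · intro y
      have h3' := PySem.Set.mem_add ex start y
      simp only [List.mem_singleton] at *
      tauto
    · intro y hy
      rw [List.mem_singleton] at hy
      subst hy
      exact hx

theorem dfsL_step (fuel : Nat) (graph : List (Int × List Int)) :
    ∀ xs path ex p e, dfsL graph fuel xs path ex = some (p, e) →
    ∃ q, p = q ++ path ∧ ∀ node st comp,
      stepB graph ((node, xs) :: st) ex comp = stepB graph st e (comp ++ q.reverse ++ [node]) := by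
  induction fuel using Nat.strong_induction_on with
  | _ fuel ih =>
  intro xs
  induction xs with
  | nil =>
    intro path ex p e h
    simp only [dfsL, Option.some.injEq, Prod.mk.injEq] at h
    obtain ⟨rfl, rfl⟩ := h
    refine ⟨[], by simp, ?_⟩
    intro node st comp
    rw [stepB]
    simp
  | cons x rest ihx =>
    intro path ex p e h
    rcases Bool.eq_false_or_eq_true (PySem.Set.contains ex x) with hcx | hcx
    · rw [dfsL, if_pos hcx] at h
      obtain ⟨q, hq, hstep⟩ := ihx path ex p e h
      refine ⟨q, hq, ?_⟩
      intro node st comp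
      rw [stepB, if_pos hcx]
      exact hstep node st comp
    · rw [dfsL, if_neg (by rw [hcx]; exact Bool.false_ne_true)] at h
      cases hA : dfsA graph fuel x path ex with
      | none => rw [hA] at h; exact absurd h (by simp)
      | some pe =>
        obtain ⟨p1, e1⟩ := pe
        rw [hA] at h
        simp only at h
        cases fuel with
        | zero => rw [dfsA] at hA; exact absurd hA (by simp)
        | succ f =>
        cases hk : (PySem.Dict.mk graph).get? x with
        | some ns =>
          rw [dfsA] at hA
          simp only [hk] at hA
          cases hL : dfsL graph f ns path (PySem.Set.add ex x) with
          | none => rw [hL] at hA; exact absurd hA (by simp)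
          | some peL =>
            obtain ⟨pL, eL⟩ := peL
            rw [hL] at hA
            simp only [Option.some.injEq, Prod.mk.injEq] at hA
            obtain ⟨hp1, he1⟩ := hA
            subst hp1; subst he1
            obtain ⟨qL, hqL, hstepL⟩ := ih f (by omega) ns path (PySem.Set.add ex x) pL eL hL
            obtain ⟨q2, hq2, hstep2⟩ := ihx (x :: pL) eL p e h
            refine ⟨q2 ++ x :: qL, by rw [hq2, hqL]; simp, ?_⟩
            intro node st comp
            have hgl : gLook graph x = ns := by simp [gLook, hk]
            rw [stepB, if_neg (by rw [hcx]; exact Bool.false_ne_true), hgl,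
                hstepL x ((node, rest) :: st) comp, hstep2 node st (comp ++ qL.reverse ++ [x])]
            congr 1
            simp
        | none =>
          rw [dfsA] at hA
          simp only [hk, Option.some.injEq, Prod.mk.injEq] at hA
          obtain ⟨hp1, he1⟩ := hA
          subst hp1; subst he1
          obtain ⟨q2, hq2, hstep2⟩ := ihx (x :: path) (PySem.Set.add ex x) p e h
          refine ⟨q2 ++ [x], by rw [hq2]; simp, ?_⟩
          intro node st comp
          have hgl : gLook graph x = [] := by simp [gLook, hk]
          rw [stepB, if_neg (by rw [hcx]; exact Bool.false_ne_true), hgl, stepB,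
              hstep2 node st (comp ++ [x])]
          congr 1
          simp

theorem dfsA_step (fuel : Nat) (graph : List (Int × List Int)) (start : Int) (path : List Int)
    (ex : PySem.Set Int) (p : List Int) (e : PySem.Set Int)
    (h : dfsA graph fuel start path ex = some (p, e)) :
    ∃ q, p = q ++ path ∧ ∀ st comp,
      stepB graph ((start, gLook graph start) :: st) (PySem.Set.add ex start) comp
        = stepB graph st e (comp ++ q.reverse) := by
  cases fuel with
  | zero => rw [dfsA] at h; exact absurd h (by simp)
  | succ f =>
  cases hk : (PySem.Dict.mk graph).get? start with
  | some ns =>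
    rw [dfsA] at h
    simp only [hk] at h
    cases hL : dfsL graph f ns path (PySem.Set.add ex start) with
    | none => rw [hL] at h; exact absurd h (by simp)
    | some peL =>
      obtain ⟨pL, eL⟩ := peL
      rw [hL] at h
      simp only [Option.some.injEq, Prod.mk.injEq] at h
      obtain ⟨hp, he⟩ := h
      subst hp; subst he
      obtain ⟨qL, hqL, hstepL⟩ := dfsL_step f graph ns path (PySem.Set.add ex start) pL eL hL
      refine ⟨start :: qL, by rw [hqL]; simp, ?_⟩
      intro st comp
      have hgl : gLook graph start = ns := by simp [gLook, hk]
      rw [hgl, hstepL start st comp]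
      congr 1
      simp
  | none =>
    rw [dfsA] at h
    simp only [hk, Option.some.injEq, Prod.mk.injEq] at h
    obtain ⟨hp, he⟩ := h
    subst hp; subst he
    refine ⟨[start], by simp, ?_⟩
    intro st comp
    have hgl : gLook graph start = [] := by simp [gLook, hk]
    rw [hgl, stepB]
    simp

def pvLast (c : List Int) : Int := c.getLast?.getD 0

theorem pvLast_mem (c : List Int) (h : c ≠ []) : pvLast c ∈ c := by
  induction c with
  | nil => exact absurd rfl h
  | cons a l ih =>
    cases l with
    | nil => simp [pvLast]
    | cons b l' =>
      rw [pvLast, List.getLast?_cons_cons]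
      exact List.mem_cons_of_mem a (ih (by simp))

theorem pvLast_concat (l : List Int) (a : Int) : pvLast (l ++ [a]) = a := by
  unfold pvLast
  rw [List.getLast?_concat]
  rfl

theorem loopB_mono (graph : List (Int × List Int)) (keys : List Int) :
    ∀ (sccs : List (List Int)) (ex : PySem.Set Int), ∃ t, (loopB graph keys sccs ex).1 = sccs ++ t := by
  induction keys with
  | nil => intro sccs ex; exact ⟨[], by simp [loopB]⟩
  | cons key keys ih =>
    intro sccs ex
    rcases Bool.eq_false_or_eq_true (PySem.Set.contains ex key) with hcx | hcx
    · obtain ⟨t, ht⟩ := ih sccs ex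
      exact ⟨t, by rw [loopB, if_pos hcx]; exact ht⟩
    · obtain ⟨t, ht⟩ := ih (sccs ++ [(stepB graph [(key, gLook graph key)] (PySem.Set.add ex key) []).1]) (stepB graph [(key, gLook graph key)] (PySem.Set.add ex key) []).2
      refine ⟨[(stepB graph [(key, gLook graph key)] (PySem.Set.add ex key) []).1] ++ t, ?_⟩
      rw [loopB, if_neg (by rw [hcx]; exact Bool.false_ne_true)]
      simp only at ht ⊢
      rw [ht]
      simp

theorem loops_eq (graph : List (Int × List Int)) (U : List Int) (fuel : Nat)
    (hcl : ∀ n y, y ∈ gLook graph n → y ∈ U) (hfu : U.length < fuel) :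
    ∀ keys path bnd ex sccs, (∀ x ∈ keys, x ∈ U) →
    path = sccs.flatten.reverse → bnd.reverse = sccs.map pvLast →
    (∀ c ∈ sccs, c ≠ [] ∧ c.Nodup ∧ ∀ x ∈ c, x ∈ ex) →
    (loopA graph fuel keys path bnd ex).1 = (loopB graph keys sccs ex).1.flatten.reverse ∧
    (loopA graph fuel keys path bnd ex).2.1.reverse = (loopB graph keys sccs ex).1.map pvLast ∧
    (∀ c ∈ (loopB graph keys sccs ex).1, c ≠ [] ∧ c.Nodup) := by
  intro keys
  induction keys with
  | nil =>
    intro path bnd ex sccs hkeys hpath hbnd hcomps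
    rw [loopA, loopB]
    exact ⟨hpath, hbnd, fun c hc => ⟨(hcomps c hc).1, (hcomps c hc).2.1⟩⟩
  | cons key keys ih =>
    intro path bnd ex sccs hkeys hpath hbnd hcomps
    rcases Bool.eq_false_or_eq_true (PySem.Set.contains ex key) with hcx | hcx
    · -- explored: both skip
      rw [loopA, if_pos hcx, loopB, if_pos hcx]
      exact ih path bnd ex sccs (fun y hy => hkeys y (List.mem_cons_of_mem _ hy)) hpath hbnd hcomps
    · -- unexplored
      have hkU : key ∈ U := hkeys key List.mem_cons_self
      have hknex : key ∉ ex := not_mem_of_contains_false ex key hcx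
      have hfuel : Mcount U ex < fuel := lt_of_le_of_lt (Mcount_le_len U ex) hfu
      obtain ⟨p, e, q, hA, hpq, hqnd, hqiff, hqfresh, t, hqt⟩ :=
        dfsA_suff fuel U graph hcl key path ex hkU hknex hfuel
      obtain ⟨q', hq', hstep⟩ := dfsA_step fuel graph key path ex p e hA
      have hqq : q' = q := by
        apply List.append_cancel_right (as := q') (bs := path)
        rw [← hq', ← hpq]
      rw [hqq] at hstep
      have hr : stepB graph [(key, gLook graph key)] (PySem.Set.add ex key) [] = (q.reverse, e) := by
        rw [hstep [] []]
        simp [stepB]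
      have hAeq : loopA graph fuel (key :: keys) path bnd ex = loopA graph fuel keys p (key :: bnd) e := by
        rw [loopA, if_neg (by rw [hcx]; exact Bool.false_ne_true), hA]
      have hBeq : loopB graph (key :: keys) sccs ex = loopB graph keys (sccs ++ [q.reverse]) e := by
        rw [loopB, if_neg (by rw [hcx]; exact Bool.false_ne_true)]
        simp only [hr]
      rw [hAeq, hBeq]
      apply ih p (key :: bnd) e (sccs ++ [q.reverse])
      · exact fun y hy => hkeys y (List.mem_cons_of_mem _ hy)
      · rw [hpq, hpath]
        simp [List.reverse_append]
      · rw [List.reverse_cons, hbnd, List.map_append]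
        simp only [List.map_cons, List.map_nil]
        congr 1
        rw [hqt, List.reverse_cons, pvLast_concat]
      · intro c hc
        rcases List.mem_append.mp hc with hc1 | hc2
        · obtain ⟨h1, h2, h3⟩ := hcomps c hc1
          exact ⟨h1, h2, fun x hx => (hqiff x).mpr (Or.inl (h3 x hx))⟩
        · rw [List.mem_singleton] at hc2
          subst hc2
          refine ⟨by rw [hqt]; simp, List.nodup_reverse.mpr hqnd, ?_⟩
          intro x hx
          exact (hqiff x).mpr (Or.inr (List.mem_reverse.mp hx))

theorem scan_one (c' : List Int) : ∀ (x : Int) (restflat rbs : List Int) (scc : PySem.Set Int) (sccs : List (List Int)),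
    (x :: c').Nodup → (∀ y ∈ x :: c', y ∉ scc) →
    scanA ((x :: c') ++ restflat) (pvLast (x :: c')) rbs scc sccs =
      (match rbs with
      | b' :: rbs' => scanA restflat b' rbs' PySem.Set.empty (sccs ++ [scc ++ (x :: c')])
      | [] => sccs ++ [restflat.foldl PySem.Set.add (scc ++ (x :: c'))]) := by
  induction c' with
  | nil =>
    intro x restflat rbs scc sccs hnd hfresh
    have hadd : PySem.Set.add scc x = scc ++ [x] :=
      PySem.Set.add_of_not_mem (hfresh x List.mem_cons_self)
    rw [List.cons_append, List.nil_append, scanA.eq_def]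
    simp only [hadd, pvLast, List.getLast?_singleton, Option.getD_some, if_pos rfl]
    simp only [if_true]
  | cons y c'' ih =>
    intro x restflat rbs scc sccs hnd hfresh
    have hxny : x ∉ (y :: c'') := (List.nodup_cons.mp hnd).1
    have hne : x ≠ pvLast (y :: c'') := by
      intro hx
      exact hxny (hx ▸ pvLast_mem (y :: c'') (by simp))
    have hadd : PySem.Set.add scc x = scc ++ [x] :=
      PySem.Set.add_of_not_mem (hfresh x List.mem_cons_self)
    have hpl : pvLast (x :: y :: c'') = pvLast (y :: c'') := by
      unfold pvLast
      rw [List.getLast?_cons_cons]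
    rw [hpl, List.cons_append, scanA.eq_def]
    simp only [hadd, if_neg hne]
    rw [ih y restflat rbs (scc ++ [x]) sccs (List.nodup_cons.mp hnd).2]
    · cases rbs with
      | nil => simp
      | cons b' rbs' => simp
    · intro z hz
      rw [List.mem_append, List.mem_singleton]
      rintro (hz1 | rfl)
      · exact hfresh z (List.mem_cons_of_mem _ hz) hz1
      · exact hxny hz

theorem scan_spec : ∀ (cs : List (List Int)) (c : List Int) (sccs : List (List Int)),
    (∀ c' ∈ c :: cs, c' ≠ [] ∧ c'.Nodup) →
    scanA ((c :: cs).flatten) (pvLast c) (cs.map pvLast) PySem.Set.empty sccs = sccs ++ c :: cs := by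
  intro cs
  induction cs with
  | nil =>
    intro c sccs hcs
    obtain ⟨hne, hnd⟩ := hcs c List.mem_cons_self
    obtain ⟨x, c', rfl⟩ := List.exists_cons_of_ne_nil hne
    have := scan_one c' x [] [] PySem.Set.empty sccs hnd (by simp [PySem.Set.empty])
    simpa using this
  | cons c2 cs ih =>
    intro c sccs hcs
    obtain ⟨hne, hnd⟩ := hcs c List.mem_cons_self
    obtain ⟨x, c', rfl⟩ := List.exists_cons_of_ne_nil hne
    have h1 := scan_one c' x ((c2 :: cs).flatten) (pvLast c2 :: cs.map pvLast) PySem.Set.empty sccs hnd (by simp [PySem.Set.empty])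
    simp only [List.flatten_cons, List.map_cons] at h1 ⊢
    rw [h1]
    have h2 := ih c2 (sccs ++ [PySem.Set.empty ++ x :: c']) (fun c' hc' => hcs c' (List.mem_cons_of_mem _ hc'))
    simp only [List.flatten_cons] at h2
    rw [h2]
    simp [PySem.Set.empty]

-- ===== VERDICT (by name: the statement is the Claim_ definition above) =====
theorem topological_sort_two_spec : Claim_equal_topological_sort_two := by
  unfold Claim_equal_topological_sort_two Spec_topological_sort_two
  intro graph so _ hpre
  unfold Pre_topological_sort_two at hpre
  have hU : ∀ n y, y ∈ gLook graph n → y ∈ so ++ pvNbrs graph :=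
    fun n y hy => List.mem_append.mpr (Or.inr (gLook_mem graph n y hy))
  have hfu : (so ++ pvNbrs graph).length < pvFuel graph so := by
    simp [pvFuel, pvNbrs]
  obtain ⟨h1, h2, h3⟩ := loops_eq graph (so ++ pvNbrs graph) (pvFuel graph so) hU hfu so [] [] PySem.Set.empty []
    (fun x hx => List.mem_append.mpr (Or.inl hx)) (by simp) (by simp) (by simp)
  obtain ⟨k, keys', rfl⟩ := List.exists_cons_of_ne_nil hpre
  have hS : (loopB graph (k :: keys') [] PySem.Set.empty).1 ≠ [] := by
    rw [loopB, if_neg (by exact Bool.false_ne_true)]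
    obtain ⟨t, ht⟩ := loopB_mono graph keys'
      ([] ++ [(stepB graph [(k, gLook graph k)] (PySem.Set.add PySem.Set.empty k) []).1])
      (stepB graph [(k, gLook graph k)] (PySem.Set.add PySem.Set.empty k) []).2
    simp only at ht ⊢
    rw [ht]
    simp
  cases hSv : (loopB graph (k :: keys') [] PySem.Set.empty).1 with
  | nil => exact absurd hSv hS
  | cons c cs =>
    rw [hSv] at h1 h2 h3
    have hA2 : (loopA graph (pvFuel graph (k :: keys')) (k :: keys') [] [] PySem.Set.empty).2.1.reverse
        = pvLast c :: cs.map pvLast := by rw [h2]; simp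
    have hA1 : (loopA graph (pvFuel graph (k :: keys')) (k :: keys') [] [] PySem.Set.empty).1.reverse
        = (c :: cs).flatten := by rw [h1, List.reverse_reverse]
    have h3' : ∀ c' ∈ c :: cs, c' ≠ [] ∧ c'.Nodup := fun c' hc' => h3 c' hc'
    unfold topological_sort_two topological_sort_two_alt
    rw [hSv]
    simp only [hA2, hA1]
    rw [scan_spec cs c [] h3']
    simp
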